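-- pv_equiv track=rewrite | github.com/MateusAlcantara13/student-grades-analyzer | main.py | contar_acima_abaixo_igual
-- ===== SOURCE A (Python) =====
-- def contar_acima_abaixo_igual(notas, mediaMin):
--
--     acima = 0
--     abaixo = 0
--     igual = 0
--
--     for nota in notas:
--         if nota > mediaMin:
--             acima += 1
--         elif nota < mediaMin:
--             abaixo += 1
--         else:
--             igual += 1
--
--     return acima, abaixo, igual
-- ===== SOURCE B (Python) =====
-- def contar_acima_abaixo_igual(notas, mediaMin):
--     acima = sum(1 for n in notas if n > mediaMin)
--     abaixo = sum(1 for n in notas if n < mediaMin)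
--     igual = len(notas) - acima - abaixo
--     return acima, abaixo, igual
-- ===== Notes on version B (the rewrite author's own statement) =====
-- stated objective: idiomatic
-- what changed: One branching accumulator loop is replaced by two independent comprehension counts (above/below) with the equal count obtained as len minus the other two.
import Mathlib
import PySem

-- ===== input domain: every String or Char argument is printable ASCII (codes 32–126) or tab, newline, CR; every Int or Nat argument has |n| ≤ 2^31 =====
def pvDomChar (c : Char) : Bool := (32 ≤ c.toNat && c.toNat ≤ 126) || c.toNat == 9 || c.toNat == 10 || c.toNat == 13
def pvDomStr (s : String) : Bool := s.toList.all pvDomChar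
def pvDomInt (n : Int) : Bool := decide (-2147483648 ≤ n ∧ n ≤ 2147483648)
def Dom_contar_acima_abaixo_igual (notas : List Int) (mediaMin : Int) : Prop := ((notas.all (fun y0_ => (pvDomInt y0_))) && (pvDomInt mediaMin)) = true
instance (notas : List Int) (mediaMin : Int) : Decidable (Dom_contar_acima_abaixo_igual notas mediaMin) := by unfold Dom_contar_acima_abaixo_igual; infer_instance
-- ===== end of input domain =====

-- B replaces A's single branching loop by two independent comprehension counts, deriving the equal count by subtraction (idiomatic).

-- ===== PORT A =====
-- literal port of A's loop: fold over notas carrying (acima, abaixo, igual)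
def contar_acima_abaixo_igual (notas : List Int) (mediaMin : Int) : Int × Int × Int :=
  notas.foldl
    (fun (st : Int × Int × Int) nota =>
      if nota > mediaMin then (st.1 + 1, st.2.1, st.2.2)
      else if nota < mediaMin then (st.1, st.2.1 + 1, st.2.2)
      else (st.1, st.2.1, st.2.2 + 1))
    (0, 0, 0)

-- ===== PORT B =====
def contar_acima_abaixo_igual_alt (notas : List Int) (mediaMin : Int) : Int × Int × Int :=
  let acima : Int := (notas.countP (fun n => n > mediaMin) : Nat)
  let abaixo : Int := (notas.countP (fun n => n < mediaMin) : Nat)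
  let igual : Int := (notas.length : Int) - acima - abaixo
  (acima, abaixo, igual)

-- ===== PRECONDITION & SPEC =====
def Spec_contar_acima_abaixo_igual (notas : List Int) (mediaMin : Int) (out : Int × Int × Int) : Prop := out = contar_acima_abaixo_igual_alt notas mediaMin
instance (notas : List Int) (mediaMin : Int) (out : Int × Int × Int) : Decidable (Spec_contar_acima_abaixo_igual notas mediaMin out) := by unfold Spec_contar_acima_abaixo_igual; infer_instance

-- ===== CLAIM (what is proved, stated in full; the proofs are below) =====
def Claim_equal_contar_acima_abaixo_igual : Prop := ∀ (notas : List Int) (mediaMin : Int), Dom_contar_acima_abaixo_igual notas mediaMin → Spec_contar_acima_abaixo_igual notas mediaMin (contar_acima_abaixo_igual notas mediaMin)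

-- ===== LEMMAS AND PROOFS =====
theorem contar_foldl_shift (notas : List Int) (mediaMin : Int) (a b i : Int) :
    notas.foldl
      (fun (st : Int × Int × Int) nota =>
        if nota > mediaMin then (st.1 + 1, st.2.1, st.2.2)
        else if nota < mediaMin then (st.1, st.2.1 + 1, st.2.2)
        else (st.1, st.2.1, st.2.2 + 1))
      (a, b, i)
    = ((a + (notas.countP (fun n => n > mediaMin) : Nat),
        b + (notas.countP (fun n => n < mediaMin) : Nat),
        i + ((notas.length : Int) - (notas.countP (fun n => n > mediaMin) : Nat)
             - (notas.countP (fun n => n < mediaMin) : Nat))) : Int × Int × Int) := by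
  induction notas generalizing a b i with
  | nil => simp
  | cons x xs ih =>
      simp only [List.foldl_cons, List.countP_cons, List.length_cons]
      by_cases h1 : mediaMin < x
      · have h2 : ¬ x < mediaMin := by omega
        rw [if_pos h1, ih]
        simp only [gt_iff_lt, h1, h2, decide_true, decide_false, if_true, if_false,
          Prod.mk.injEq]
        refine ⟨?_, ?_, ?_⟩ <;> (push_cast; omega)
      · rw [if_neg h1]
        by_cases h2 : x < mediaMin
        · rw [if_pos h2, ih]
          simp only [gt_iff_lt, h1, h2, decide_true, decide_false, if_true, if_false,
            Prod.mk.injEq]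
          refine ⟨?_, ?_, ?_⟩ <;> (push_cast; omega)
        · rw [if_neg h2, ih]
          simp only [gt_iff_lt, h1, h2, decide_true, decide_false, if_true, if_false,
            Prod.mk.injEq]
          refine ⟨?_, ?_, ?_⟩ <;> (push_cast; omega)

-- ===== VERDICT (by name: the statement is the Claim_ definition above) =====
theorem contar_acima_abaixo_igual_spec : Claim_equal_contar_acima_abaixo_igual := by
  intro notas mediaMin _
  show contar_acima_abaixo_igual notas mediaMin = _
  unfold contar_acima_abaixo_igual contar_acima_abaixo_igual_alt
  rw [contar_foldl_shift]
  simp
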